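-- pv_equiv track=rewrite | github.com/king-one1/ikhwan | Struktur_Data(UAS).py | estimasi_waktu
-- ===== SOURCE A (Python) =====
-- layanan_laundry = (
--     ("Cuci Kering", 6),
--     ("Cuci Setrika", 8),
--     ("Setrika Saja", 4),
--     ("Express 3 Jam", 3)
-- )
--
-- def estimasi_waktu(antrian):
--     total_jam = 0
--     for data in antrian:
--         for layanan in data['layanan']:
--             for nama, durasi in layanan_laundry:
--                 if layanan == nama:
--                     total_jam += durasi
--     return total_jam
-- ===== SOURCE B (Python) =====
-- layanan_laundry = (
--     ("Cuci Kering", 6),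
--     ("Cuci Setrika", 8),
--     ("Setrika Saja", 4),
--     ("Express 3 Jam", 3)
-- )
--
-- def estimasi_waktu(antrian):
--     total = 0
--     for nama, durasi in layanan_laundry:
--         total += durasi * sum(data['layanan'].count(nama) for data in antrian)
--     return total
-- ===== Notes on version B (the rewrite author's own statement) =====
-- stated objective: alternative
-- what changed: B reverses the nesting: the OUTER loop runs over the fixed four-entry tariff table and for each service name it counts that name's occurrences across the whole queue with list.count, then adds durasi * count; A loops queue-major and scans the table once per service occurrence.
import Mathlib
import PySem

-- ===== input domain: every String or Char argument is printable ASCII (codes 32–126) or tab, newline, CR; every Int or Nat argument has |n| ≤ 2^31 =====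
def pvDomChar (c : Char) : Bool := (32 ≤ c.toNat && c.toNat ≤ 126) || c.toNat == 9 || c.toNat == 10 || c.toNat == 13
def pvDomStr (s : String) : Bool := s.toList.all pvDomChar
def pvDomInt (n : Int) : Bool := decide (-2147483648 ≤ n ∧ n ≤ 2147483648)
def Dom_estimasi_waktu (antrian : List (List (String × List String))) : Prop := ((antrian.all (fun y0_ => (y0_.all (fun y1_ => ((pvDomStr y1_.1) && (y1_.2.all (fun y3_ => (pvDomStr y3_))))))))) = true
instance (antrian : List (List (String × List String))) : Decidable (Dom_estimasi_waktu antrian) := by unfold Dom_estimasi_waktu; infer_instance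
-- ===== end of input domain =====

-- B reverses the nesting (alternative, same cost): the outer loop runs over the fixed tariff
-- table and counts each service name across the whole queue, instead of A's queue-major loop
-- scanning the table per service occurrence.

-- ===== PORT A =====
-- the module-level tuple layanan_laundry
def layananLaundry : List (String × Int) :=
  [("Cuci Kering", 6), ("Cuci Setrika", 8), ("Setrika Saja", 4), ("Express 3 Jam", 3)]

def estimasi_waktu (antrian : List (List (String × List String))) : Int :=
  antrian.foldl (fun total_jam data =>
    -- data['layanan']: first-match lookup; Pre_ guarantees the key exists (KeyError excluded), so getD [] is never taken
    ((data.lookup "layanan").getD []).foldl (fun t layanan =>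
      layananLaundry.foldl (fun t2 p => if layanan == p.1 then t2 + p.2 else t2) t) total_jam) 0

-- ===== PORT B =====
def estimasi_waktu_alt (antrian : List (List (String × List String))) : Int :=
  layananLaundry.foldl (fun total p =>
    total + p.2 * (antrian.map (fun data =>
      (PySem.List.count ((data.lookup "layanan").getD []) p.1 : Int))).sum) 0

-- ===== PRECONDITION & SPEC =====
-- Pre_ excludes exactly the inputs where A raises KeyError: an order without the 'layanan' key.
def Pre_estimasi_waktu (antrian : List (List (String × List String))) : Prop :=
  (antrian.all (fun data => (data.lookup "layanan").isSome)) = true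
instance (antrian : List (List (String × List String))) : Decidable (Pre_estimasi_waktu antrian) := by unfold Pre_estimasi_waktu; infer_instance
def pvWitness_estimasi_waktu : (List (List (String × List String))) :=
  [[("layanan", ["Cuci Kering", "Express 3 Jam"])], [("layanan", [])]]

def Spec_estimasi_waktu (antrian : List (List (String × List String))) (out : Int) : Prop := out = estimasi_waktu_alt antrian
instance (antrian : List (List (String × List String))) (out : Int) : Decidable (Spec_estimasi_waktu antrian out) := by unfold Spec_estimasi_waktu; infer_instance

-- ===== CLAIM (what is proved, stated in full; the proofs are below) =====
def Claim_equal_estimasi_waktu : Prop := ∀ (antrian : List (List (String × List String))), Dom_estimasi_waktu antrian → Pre_estimasi_waktu antrian → Spec_estimasi_waktu antrian (estimasi_waktu antrian)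

-- ===== LEMMAS AND PROOFS =====

-- weight of one service name against a table
def pvW (L : List (String × Int)) (x : String) : Int :=
  (L.map (fun p => if x == p.1 then p.2 else 0)).sum

lemma pv_inner (L : List (String × Int)) (x : String) (t : Int) :
    L.foldl (fun t2 p => if x == p.1 then t2 + p.2 else t2) t = t + pvW L x := by
  have h : L.foldl (fun t2 p => if x == p.1 then t2 + p.2 else t2) t
      = L.foldl (fun t2 p => t2 + (if x == p.1 then p.2 else 0)) t := by
    congr 1; funext t2 p; split <;> simp
  rw [h, PySem.List.foldl_add]; rfl

lemma pv_step (L : List (String × Int)) (x : String) (f : List String) :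
    (L.map (fun p => p.2 * (((x :: f).count p.1 : Nat) : Int))).sum
      = pvW L x + (L.map (fun p => p.2 * ((f.count p.1 : Nat) : Int))).sum := by
  simp only [List.count_cons]
  push_cast
  simp only [mul_add]
  rw [PySem.List.sum_map_add_int]
  simp only [pvW, mul_ite, mul_one, mul_zero, beq_iff_eq]
  ring

-- total over the flattened service list, computed name-major, equals the table-major weighted sum
lemma pv_main (L : List (String × Int)) (f : List String) :
    f.foldl (fun t x => t + pvW L x) 0
      = (L.map (fun p => p.2 * ((f.count p.1 : Nat) : Int))).sum := by
  rw [PySem.List.foldl_add, zero_add]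
  induction f with
  | nil => simp
  | cons x f ih => rw [List.map_cons, List.sum_cons, pv_step, ih]

-- sum of per-order counts = count over the flattened queue
lemma pv_count_flat (antrian : List (List (String × List String))) (v : String) :
    (antrian.map (fun data =>
        (PySem.List.count ((data.lookup "layanan").getD []) v : Int))).sum
      = (((antrian.flatMap (fun data => (data.lookup "layanan").getD [])).count v : Nat) : Int) := by
  induction antrian with
  | nil => simp
  | cons d t ih =>
      simp only [List.map_cons, List.sum_cons, List.flatMap_cons, List.count_append,
        PySem.List.count_eq] at ih ⊢
      rw [ih]; push_cast; ring

-- ===== VERDICT (by name: the statement is the Claim_ definition above) =====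
theorem estimasi_waktu_spec : Claim_equal_estimasi_waktu := by
  intro antrian _ _
  unfold Spec_estimasi_waktu estimasi_waktu estimasi_waktu_alt
  have hB : layananLaundry.foldl (fun total p =>
      total + p.2 * (antrian.map (fun data =>
        (PySem.List.count ((data.lookup "layanan").getD []) p.1 : Int))).sum) 0
      = (layananLaundry.map (fun p => p.2 *
          (((antrian.flatMap (fun data => (data.lookup "layanan").getD [])).count p.1 : Nat) : Int))).sum := by
    rw [PySem.List.foldl_add, zero_add]
    refine congrArg List.sum (List.map_congr_left ?_)
    intro p _; rw [pv_count_flat]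
  rw [hB, ← pv_main layananLaundry]
  rw [List.foldl_flatMap]
  congr 1
  funext total data
  rw [PySem.List.foldl_add]
  induction ((data.lookup "layanan").getD []) generalizing total with
  | nil => simp
  | cons x xs ih => rw [List.foldl_cons, ih, pv_inner, List.map_cons, List.sum_cons]; ring
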